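-- pv_equiv track=rewrite | github.com/YasinKaryagdi/Thesis | main.py | get_all_permutations
-- ===== SOURCE A (Python) =====
-- def get_all_permutations(currlist, n):
--     all_permutations = [currlist]
--
--     for switch in range(0, n):
--         curr_list_size = len(all_permutations)
--         for x in range(0, curr_list_size):
--             for i in range(0, len(currlist) - 1):
--                 temp_list = all_permutations[x].copy()
--
--                 # swap i and i + 1
--                 temp = temp_list[i]
--                 temp_list[i] = temp_list[i + 1]
--                 temp_list[i + 1] = temp
--
--                 if not temp_list in all_permutations:
--                     all_permutations.append(temp_list)
--     return all_permutations
-- ===== SOURCE B (Python) =====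
-- def get_all_permutations(currlist, n):
--     result = [currlist]
--     seen = {tuple(currlist)}
--     frontier = [currlist]
--     d = 0
--     while d < n and frontier:
--         new_frontier = []
--         for p in frontier:
--             for i in range(len(p) - 1):
--                 t = p.copy()
--                 t[i], t[i + 1] = t[i + 1], t[i]
--                 key = tuple(t)
--                 if key not in seen:
--                     seen.add(key)
--                     result.append(t)
--                     new_frontier.append(t)
--         frontier = new_frontier
--         d += 1
--     return result
-- ===== Notes on version B (the rewrite author's own statement) =====
-- stated objective: alternative
-- what changed: Replaced A's n-round full re-scan (each round re-expands every permutation found so far and tests membership by scanning the whole result list) with a frontier-based BFS that expands only the previous round's discoveries, dedups via a seen-set of tuples, and stops early when the frontier empties.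
import Mathlib
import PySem

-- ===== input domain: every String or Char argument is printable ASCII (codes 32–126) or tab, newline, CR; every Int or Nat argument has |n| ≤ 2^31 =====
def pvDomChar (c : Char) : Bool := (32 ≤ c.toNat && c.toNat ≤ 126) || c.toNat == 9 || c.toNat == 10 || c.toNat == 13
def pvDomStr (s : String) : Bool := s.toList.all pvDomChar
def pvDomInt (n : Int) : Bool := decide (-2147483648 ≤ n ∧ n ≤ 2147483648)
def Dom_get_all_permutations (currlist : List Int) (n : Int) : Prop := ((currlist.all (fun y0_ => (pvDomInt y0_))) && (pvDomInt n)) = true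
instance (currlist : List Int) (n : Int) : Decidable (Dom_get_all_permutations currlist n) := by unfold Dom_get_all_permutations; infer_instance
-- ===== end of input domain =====

-- B replaces A's re-scan of the whole result list each round by a frontier-based BFS with a
-- `seen` set, expanding only last round's discoveries and stopping when it empties (objective: alternative).

-- ===== PORT A =====
-- adjacent swap at positions i, i+1 (always in range wherever the ports use it, so
-- List.set / List.getD are exact renderings of the Python index assignments/reads)
def swapAdj (p : List Int) (i : Nat) : List Int :=
  (p.set i (p.getD (i+1) 0)).set (i+1) (p.getD i 0)

-- inner `for i in range(0, len(currlist) - 1)` loop body of A (Nat subtraction L-1 matches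
-- Python's empty range when len(currlist) = 0)
def expandA (L : Nat) (cur : List (List Int)) (p : List Int) : List (List Int) :=
  (List.range (L - 1)).foldl (fun c i =>
    let t := swapAdj p i
    if t ∈ c then c else c ++ [t]) cur

-- middle `for x in range(0, curr_list_size)` loop: reads all_permutations[x] from the CURRENT list
def levelA (L : Nat) (acc : List (List Int)) : List (List Int) :=
  (List.range acc.length).foldl (fun c x => expandA L c (c.getD x [])) acc

def get_all_permutations (currlist : List Int) (n : Int) : List (List Int) :=
  (PySem.List.pyRange 0 n 1).foldl (fun acc _ => levelA currlist.length acc) [currlist]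

-- ===== PORT B =====
-- inner loop of B over one frontier element p: state (result, seen, new_frontier)
def expandB (st : List (List Int) × PySem.Set (List Int) × List (List Int)) (p : List Int) :
    List (List Int) × PySem.Set (List Int) × List (List Int) :=
  (List.range (p.length - 1)).foldl (fun st i =>
    let (res, seen, nf) := st
    let t := swapAdj p i
    if t ∈ seen then (res, seen, nf)
    else (res ++ [t], PySem.Set.add seen t, nf ++ [t])) st

-- one round: `for p in frontier: …`, starting from an empty new_frontier
def roundB (res : List (List Int)) (seen : PySem.Set (List Int)) (frontier : List (List Int)) :
    List (List Int) × PySem.Set (List Int) × List (List Int) :=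
  frontier.foldl expandB (res, seen, [])

-- `while d < n and frontier:` — exactly n.toNat rounds unless the frontier empties first
def loopB : Nat → List (List Int) → PySem.Set (List Int) → List (List Int) → List (List Int)
  | 0, res, _, _ => res
  | Nat.succ k, res, seen, frontier =>
    if frontier.isEmpty then res
    else
      let (res', seen', nf) := roundB res seen frontier
      loopB k res' seen' nf

def get_all_permutations_alt (currlist : List Int) (n : Int) : List (List Int) :=
  loopB n.toNat [currlist] (PySem.Set.ofList [currlist]) [currlist]

-- ===== PRECONDITION & SPEC =====
def Spec_get_all_permutations (currlist : List Int) (n : Int) (out : List (List Int)) : Prop := out = get_all_permutations_alt currlist n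
instance (currlist : List Int) (n : Int) (out : List (List Int)) : Decidable (Spec_get_all_permutations currlist n out) := by unfold Spec_get_all_permutations; infer_instance

-- ===== CLAIM (what is proved, stated in full; the proofs are below) =====
def Claim_equal_get_all_permutations : Prop := ∀ (currlist : List Int) (n : Int), Dom_get_all_permutations currlist n → Spec_get_all_permutations currlist n (get_all_permutations currlist n)

-- ===== LEMMAS AND PROOFS =====

-- A's n outer iterations as plain Nat recursion
def iterA (L : Nat) : Nat → List (List Int) → List (List Int)
  | 0, acc => acc
  | Nat.succ k, acc => iterA L k (levelA L acc)

-- all neighbours (adjacent swaps) of every p ∈ xs lie in res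
def closed (L : Nat) (xs res : List (List Int)) : Prop :=
  ∀ p ∈ xs, ∀ i ∈ List.range (L - 1), swapAdj p i ∈ res

lemma length_swapAdj (p : List Int) (i : Nat) : (swapAdj p i).length = p.length := by
  simp [swapAdj]

lemma foldl_const_eq_iter {α β : Type} (f : α → α) (l : List β) (a : α) :
    l.foldl (fun x _ => f x) a = f^[l.length] a := by
  induction l generalizing a with
  | nil => rfl
  | cons b l ih => simp [List.foldl_cons, ih, Function.iterate_succ_apply]

lemma iterA_eq_iterate (L k : Nat) (acc : List (List Int)) :
    iterA L k acc = (levelA L)^[k] acc := by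
  induction k generalizing acc with
  | zero => rfl
  | succ k ih => simp [iterA, ih, Function.iterate_succ_apply]

-- expandA-style fold only appends
lemma foldA_append (p : List Int) (l : List Nat) (cur : List (List Int)) :
    ∃ suf, l.foldl (fun c i =>
      let t := swapAdj p i
      if t ∈ c then c else c ++ [t]) cur = cur ++ suf := by
  induction l generalizing cur with
  | nil => exact ⟨[], by simp⟩
  | cons i l ih =>
    simp only [List.foldl_cons]
    by_cases h : swapAdj p i ∈ cur
    · simpa [h] using ih cur
    · obtain ⟨suf, hs⟩ := ih (cur ++ [swapAdj p i])
      exact ⟨[swapAdj p i] ++ suf, by simp [h, hs]⟩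

lemma expandA_append (L : Nat) (cur : List (List Int)) (p : List Int) :
    ∃ suf, expandA L cur p = cur ++ suf := foldA_append p _ cur

-- if every neighbour is already present, expandA is a no-op
lemma foldA_noop (p : List Int) (l : List Nat) (cur : List (List Int))
    (h : ∀ i ∈ l, swapAdj p i ∈ cur) :
    l.foldl (fun c i =>
      let t := swapAdj p i
      if t ∈ c then c else c ++ [t]) cur = cur := by
  induction l with
  | nil => rfl
  | cons i l ih =>
    have hi : swapAdj p i ∈ cur := h i (by simp)
    simp only [List.foldl_cons, hi, if_pos]
    exact ih (fun j hj => h j (by simp [hj]))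

lemma expandA_noop (L : Nat) (cur : List (List Int)) (p : List Int)
    (h : ∀ i ∈ List.range (L - 1), swapAdj p i ∈ cur) :
    expandA L cur p = cur := foldA_noop p _ cur h

-- folding expandA over elements whose neighbours are all in cur is a no-op
lemma foldl_expandA_noop (L : Nat) (xs cur : List (List Int))
    (h : closed L xs cur) :
    xs.foldl (expandA L) cur = cur := by
  induction xs with
  | nil => rfl
  | cons p xs ih =>
    have : expandA L cur p = cur := expandA_noop L cur p (h p (by simp))
    simp only [List.foldl_cons, this]
    exact ih (fun q hq i hi => h q (by simp [hq]) i hi)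

-- the paired per-element fold: B's state stays (res, res, nf) in lockstep with A's fold
lemma foldB_pair (p : List Int) (l : List Nat) :
    ∀ (res nf : List (List Int)),
    ∃ suf,
      l.foldl (fun st i =>
        let (res, seen, nf) := st
        let t := swapAdj p i
        if t ∈ seen then (res, seen, nf)
        else (res ++ [t], PySem.Set.add seen t, nf ++ [t])) (res, res, nf)
        = (res ++ suf, res ++ suf, nf ++ suf)
      ∧ l.foldl (fun c i =>
          let t := swapAdj p i
          if t ∈ c then c else c ++ [t]) res = res ++ suf
      ∧ (∀ q ∈ suf, ∃ i, q = swapAdj p i)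
      ∧ (∀ i ∈ l, swapAdj p i ∈ res ++ suf) := by
  induction l with
  | nil => intro res nf; exact ⟨[], by simp, by simp, by simp, by simp⟩
  | cons i l ih =>
    intro res nf
    by_cases h : swapAdj p i ∈ res
    · obtain ⟨suf, h1, h2, h3, h4⟩ := ih res nf
      refine ⟨suf, ?_, ?_, h3, ?_⟩
      · simpa [h] using h1
      · simpa [h] using h2
      · intro j hj
        rcases List.mem_cons.mp hj with rfl | hj
        · exact List.mem_append_left _ h
        · exact h4 j hj
    · obtain ⟨suf, h1, h2, h3, h4⟩ := ih (res ++ [swapAdj p i]) (nf ++ [swapAdj p i])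
      have hadd : PySem.Set.add (α := List Int) res (swapAdj p i) = res ++ [swapAdj p i] := by
        simp [PySem.Set.add, h]
      refine ⟨[swapAdj p i] ++ suf, ?_, ?_, ?_, ?_⟩
      · simpa [h, hadd] using h1
      · simpa [h] using h2
      · intro q hq
        rcases List.mem_append.mp hq with hq | hq
        · have : q = swapAdj p i := by simpa using hq
          exact ⟨i, this.symm ▸ rfl⟩
        · exact h3 q hq
      · intro j hj
        rcases List.mem_cons.mp hj with rfl | hj
        · simp
        · have := h4 j hj
          simpa [List.append_assoc] using this

-- one whole frontier: B's fold over the frontier tracks A's fold, returning the new suffix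
lemma roundB_pair (L : Nat) (fr : List (List Int)) :
    ∀ (res nf : List (List Int)), (∀ p ∈ fr, p.length = L) →
    ∃ suf,
      fr.foldl expandB (res, res, nf) = (res ++ suf, res ++ suf, nf ++ suf)
      ∧ fr.foldl (expandA L) res = res ++ suf
      ∧ (∀ q ∈ suf, ∃ p ∈ fr, ∃ i, q = swapAdj p i)
      ∧ closed L fr (res ++ suf) := by
  induction fr with
  | nil => intro res nf _; exact ⟨[], by simp, by simp, by simp, by simp [closed]⟩
  | cons p fr ih =>
    intro res nf hlen
    have hp : p.length = L := hlen p (by simp)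
    obtain ⟨suf1, b1, a1, s1, m1⟩ := foldB_pair p (List.range (p.length - 1)) res nf
    have hrange : List.range (L - 1) = List.range (p.length - 1) := by rw [hp]
    obtain ⟨suf2, b2, a2, s2, m2⟩ := ih (res ++ suf1) (nf ++ suf1)
      (fun q hq => hlen q (by simp [hq]))
    refine ⟨suf1 ++ suf2, ?_, ?_, ?_, ?_⟩
    · simp only [List.foldl_cons, expandB, b1, b2, List.append_assoc]
    · have : expandA L res p = res ++ suf1 := by
        simpa [expandA, hrange] using a1
      simp only [List.foldl_cons, this, a2, List.append_assoc]
    · intro q hq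
      rcases List.mem_append.mp hq with hq | hq
      · obtain ⟨i, hi⟩ := s1 q hq
        exact ⟨p, by simp, i, hi⟩
      · obtain ⟨r, hr, i, hi⟩ := s2 q hq
        exact ⟨r, by simp [hr], i, hi⟩
    · intro q hq i hi
      rcases List.mem_cons.mp hq with rfl | hq
      · have := m1 i (by rwa [← hrange])
        simp only [List.mem_append] at this ⊢
        tauto
      · have := m2 q hq i hi
        simp only [List.mem_append] at this ⊢
        tauto

-- levelA's index loop reads only the untouched prefix: it equals the fold over the snapshot
lemma map_getD_range (l : List (List Int)) :
    (List.range l.length).map (fun i => l.getD i []) = l := by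
  apply List.ext_getElem
  · simp
  · intro i h1 h2
    simp [List.getD_eq_getElem?_getD, List.getElem?_eq_getElem h2]

lemma foldl_idx_stable (L : Nat) (acc : List (List Int)) (idxs : List Nat)
    (hidx : ∀ x ∈ idxs, x < acc.length) :
    ∀ (ext : List (List Int)),
    idxs.foldl (fun c x => expandA L c (c.getD x [])) (acc ++ ext)
      = (idxs.map (fun x => acc.getD x [])).foldl (expandA L) (acc ++ ext) := by
  induction idxs with
  | nil => intro ext; rfl
  | cons x idxs ih =>
    intro ext
    have hx : x < acc.length := hidx x (by simp)
    have hget : (acc ++ ext).getD x [] = acc.getD x [] := by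
      simp [List.getD_eq_getElem?_getD, List.getElem?_append_left hx]
    simp only [List.foldl_cons, List.map_cons, hget]
    obtain ⟨suf, hs⟩ := expandA_append L (acc ++ ext) (acc.getD x [])
    rw [hs, List.append_assoc]
    exact ih (fun y hy => hidx y (by simp [hy])) (ext ++ suf)

lemma levelA_eq_foldl (L : Nat) (acc : List (List Int)) :
    levelA L acc = acc.foldl (expandA L) acc := by
  have h := foldl_idx_stable L acc (List.range acc.length)
    (fun x hx => List.mem_range.mp hx) []
  rw [List.append_nil] at h
  rw [levelA, h, map_getD_range]

-- main lockstep invariant: result = old ++ frontier, old fully expanded, everything length L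
lemma main_loop (L : Nat) (k : Nat) :
    ∀ (old fr : List (List Int)),
    (∀ p ∈ old ++ fr, p.length = L) →
    closed L old (old ++ fr) →
    iterA L k (old ++ fr) = loopB k (old ++ fr) (old ++ fr) fr := by
  induction k with
  | zero => intro old fr _ _; rfl
  | succ k ih =>
    intro old fr hlen hcl
    rcases fr with _ | ⟨p, fr'⟩
    · -- empty frontier: both sides are stuck at old
      have hfix : levelA L old = old := by
        rw [levelA_eq_foldl]
        exact foldl_expandA_noop L old old (by simpa using hcl)
      have := ih old [] (by simpa using hlen) (by simpa using hcl)
      simp only [List.append_nil] at this ⊢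
      simp only [iterA, hfix, this]
      rcases k with _ | k <;> simp [loopB]
    · set fr := p :: fr' with hfr
      have hfrlen : ∀ q ∈ fr, q.length = L := fun q hq => hlen q (by simp [hq])
      obtain ⟨suf, b1, a1, s1, m1⟩ := roundB_pair L fr (old ++ fr) [] hfrlen
      have hlevel : levelA L (old ++ fr) = (old ++ fr) ++ suf := by
        rw [levelA_eq_foldl, List.foldl_append]
        rw [foldl_expandA_noop L old (old ++ fr) hcl]
        exact a1
      have hsuflen : ∀ q ∈ suf, q.length = L := by
        intro q hq
        obtain ⟨r, hr, i, rfl⟩ := s1 q hq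
        rw [length_swapAdj]
        exact hfrlen r hr
      have hlen' : ∀ q ∈ (old ++ fr) ++ suf, q.length = L := by
        intro q hq
        rcases List.mem_append.mp hq with hq | hq
        · exact hlen q hq
        · exact hsuflen q hq
      have hcl' : closed L (old ++ fr) ((old ++ fr) ++ suf) := by
        intro q hq i hi
        rcases List.mem_append.mp hq with hq | hq
        · exact List.mem_append_left _ (hcl q hq i hi)
        · exact m1 q hq i hi
      have hIH := ih (old ++ fr) suf (by simpa using hlen') (by simpa using hcl')
      have hne : (fr.isEmpty) = false := by simp [hfr]
      simp only [iterA, hlevel, loopB, hne, Bool.false_eq_true, if_false, roundB, b1]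
      simpa using hIH

lemma pyRange_fold_iter (L : Nat) (n : Int) (init : List (List Int)) :
    (PySem.List.pyRange 0 n 1).foldl (fun acc _ => levelA L acc) init
      = iterA L n.toNat init := by
  rw [foldl_const_eq_iter, iterA_eq_iterate]
  congr 1
  simp [PySem.List.length_pyRange_one]

-- ===== VERDICT (by name: the statement is the Claim_ definition above) =====
theorem get_all_permutations_spec : Claim_equal_get_all_permutations := by
  intro currlist n _
  unfold Spec_get_all_permutations get_all_permutations get_all_permutations_alt
  rw [pyRange_fold_iter]
  have hset : PySem.Set.ofList [currlist] = [currlist] := by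
    simp [PySem.Set.ofList]
  have := main_loop currlist.length n.toNat [] [currlist]
    (by intro p hp; simp at hp; simp [hp]) (by intro p hp; simp at hp)
  simpa [hset] using this
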